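-- pv_equiv track=rewrite | github.com/Moonscape/strokeDTI | strokeDTI/predict_dti/encoder.py | trans_protein
-- ===== SOURCE A (Python) =====
-- amino_char = [
--     "?",
--     "A",
--     "B",
--     "C",
--     "D",
--     "E",
--     "F",
--     "G",
--     "H",
--     "I",
--     "K",
--     "M",
--     "L",
--     "O",
--     "N",
--     "Q",
--     "P",
--     "S",
--     "R",
--     "U",
--     "T",
--     "W",
--     "V",
--     "Y",
--     "X",
--     "Z",
-- ]
--
-- MAX_SEQ_PROTEIN = 1000
--
-- def trans_protein(x):
--     temp = list(x.upper())
--     temp = [i if i in amino_char else "?" for i in temp]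
--     if len(temp) < MAX_SEQ_PROTEIN:
--         temp = temp + ["?"] * (MAX_SEQ_PROTEIN - len(temp))
--     else:
--         temp = temp[:MAX_SEQ_PROTEIN]
--     return temp
-- ===== SOURCE B (Python) =====
-- amino_char = [
--     "?", "A", "B", "C", "D", "E", "F", "G", "H", "I", "K", "M", "L",
--     "O", "N", "Q", "P", "S", "R", "U", "T", "W", "V", "Y", "X", "Z",
-- ]
--
-- MAX_SEQ_PROTEIN = 1000
--
-- def trans_protein(x):
--     up = x.upper()
--     return [
--         up[i] if i < len(up) and up[i] in amino_char else "?"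
--         for i in range(MAX_SEQ_PROTEIN)
--     ]
-- ===== Notes on version B (the rewrite author's own statement) =====
-- stated objective: faster
-- what changed: Instead of mapping over the whole input and then padding or truncating in a separate conditional, B builds the fixed-length result in one comprehension over range(1000), indexing into the uppercased input where it is long enough and emitting the placeholder otherwise, so it never scans past position 1000.
import Mathlib
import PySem

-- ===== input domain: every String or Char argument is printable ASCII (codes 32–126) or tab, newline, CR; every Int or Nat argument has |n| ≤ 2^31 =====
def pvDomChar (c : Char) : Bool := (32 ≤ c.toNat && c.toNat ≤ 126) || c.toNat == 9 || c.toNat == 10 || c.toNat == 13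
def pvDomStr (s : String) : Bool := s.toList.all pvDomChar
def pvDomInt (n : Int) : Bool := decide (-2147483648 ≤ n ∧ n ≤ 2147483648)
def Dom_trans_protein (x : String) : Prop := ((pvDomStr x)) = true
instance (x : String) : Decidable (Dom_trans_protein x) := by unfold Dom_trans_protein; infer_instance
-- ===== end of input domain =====

-- B builds the fixed-length output in one comprehension over range(1000) instead of mapping then padding/truncating (objective: simpler).
-- ===== PORT A =====
def aminoChar : List String :=
  ["?", "A", "B", "C", "D", "E", "F", "G", "H", "I", "K", "M", "L",
   "O", "N", "Q", "P", "S", "R", "U", "T", "W", "V", "Y", "X", "Z"]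

def trans_protein (x : String) : List String :=
  let temp := (PySem.Str.upper x).toList.map (fun c => String.mk [c])
  let temp2 := temp.map (fun i => if aminoChar.contains i then i else "?")
  if temp2.length < 1000 then temp2 ++ List.replicate (1000 - temp2.length) "?"
  else temp2.take 1000

-- ===== PORT B =====
def trans_protein_alt (x : String) : List String :=
  let up := (PySem.Str.upper x).toList
  (List.range 1000).map (fun i =>
    if h : i < up.length then
      let c := String.mk [up[i]]
      if aminoChar.contains c then c else "?"
    else "?")

-- ===== PRECONDITION & SPEC =====
def Spec_trans_protein (x : String) (out : List String) : Prop := out = trans_protein_alt x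
instance (x : String) (out : List String) : Decidable (Spec_trans_protein x out) := by unfold Spec_trans_protein; infer_instance

-- ===== CLAIM (what is proved, stated in full; the proofs are below) =====
def Claim_equal_trans_protein : Prop := ∀ (x : String), Dom_trans_protein x → Spec_trans_protein x (trans_protein x)

-- ===== LEMMAS AND PROOFS =====

-- ===== VERDICT (by name: the statement is the Claim_ definition above) =====
-- the common pointwise shape, generic in the uppercased character list
theorem pad_eq_range_map (up : List Char) (h : Char → String) :
    (if (up.map h).length < 1000 then
        up.map h ++ List.replicate (1000 - (up.map h).length) "?"
      else (up.map h).take 1000)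
    = (List.range 1000).map (fun i => if hi : i < up.length then h up[i] else "?") := by
  apply List.ext_getElem
  · split_ifs with hl <;> simp_all <;> omega
  · intro i h1 h2
    simp only [List.getElem_map, List.getElem_range]
    split_ifs with hl
    · simp only [List.length_map] at hl
      by_cases hi : i < up.length
      · rw [List.getElem_append_left (by simpa using hi)]
        simp [hi]
      · rw [List.getElem_append_right (by simpa using hi)]
        simp [hi]
    · simp only [List.length_map, not_lt] at hl
      have hi : i < up.length := by
        simp_all; omega
      rw [List.getElem_take]
      simp [hi]

theorem trans_protein_spec : Claim_equal_trans_protein := by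
  intro x _
  show trans_protein x = trans_protein_alt x
  unfold trans_protein trans_protein_alt
  simp only [List.map_map, Function.comp_def]
  exact pad_eq_range_map ((PySem.Str.upper x).toList)
    (fun c => if aminoChar.contains (String.mk [c]) then String.mk [c] else "?")
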